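-- pv_equiv track=rewrite | github.com/joergpichler/AdventOfCode | 2015/Day25/Day25.py | get_code
-- ===== SOURCE A (Python) =====
-- def get_code(target_row: int, target_col: int):
--     code = 20151125
--     target_coord = (target_row, target_col)
--     coord = (1, 1)
--     if coord == target_coord:
--         return code
--     row = 1
--
--     while True:
--         coord = (coord[0] - 1, coord[1] + 1)
--         if coord[0] == 0:
--             row += 1
--             coord = (row, 1)
--         code = (code * 252533) % 33554393
--         if coord == target_coord:
--             return code
-- ===== SOURCE B (Python) =====
-- def get_code(target_row: int, target_col: int):
--     # closed form: the target is the n-th code in diagonal order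
--     s = target_row + target_col
--     n = (s - 2) * (s - 1) // 2 + target_col
--     return 20151125 * pow(252533, n - 1, 33554393) % 33554393
-- ===== Notes on version B (the rewrite author's own statement) =====
-- stated objective: faster
-- what changed: Replaces the step-by-step diagonal walk with the closed-form diagonal index n = (r+c-2)(r+c-1)/2 + c and one modular exponentiation 20151125 * 252533^(n-1) mod 33554393.
import Mathlib
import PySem

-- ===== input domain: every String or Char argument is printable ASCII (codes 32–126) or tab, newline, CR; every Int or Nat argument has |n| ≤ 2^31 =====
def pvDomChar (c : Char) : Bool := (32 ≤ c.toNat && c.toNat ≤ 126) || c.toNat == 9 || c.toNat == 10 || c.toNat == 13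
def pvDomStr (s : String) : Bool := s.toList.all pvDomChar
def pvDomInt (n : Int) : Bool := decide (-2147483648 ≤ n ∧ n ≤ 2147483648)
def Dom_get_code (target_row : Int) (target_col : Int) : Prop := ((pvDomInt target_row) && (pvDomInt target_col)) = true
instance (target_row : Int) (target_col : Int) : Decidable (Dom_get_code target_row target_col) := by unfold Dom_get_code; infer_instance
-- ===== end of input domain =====

-- B replaces A's step-by-step diagonal walk with the closed-form diagonal index and one
-- modular exponentiation (objective: faster, asymptotically).


-- ===== PORT A =====
-- the while-True loop; fuel is only a totality guard (proved large enough under Pre_);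
-- '%' on Int agrees with Python's '%' here because the modulus 33554393 is positive
def loopA (target : Int × Int) (coord : Int × Int) (row : Int) (code : Int) : Nat → Int
  | 0 => 0
  | fuel + 1 =>
    let c1 : Int × Int := (coord.1 - 1, coord.2 + 1)
    let row' : Int := if c1.1 = 0 then row + 1 else row
    let c2 : Int × Int := if c1.1 = 0 then (row + 1, 1) else c1
    let code' : Int := (code * 252533) % 33554393
    if c2 = target then code' else loopA target c2 row' code' fuel

def get_code (target_row : Int) (target_col : Int) : Int :=
  let code : Int := 20151125
  if ((1, 1) : Int × Int) = (target_row, target_col) then code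
  else
    loopA (target_row, target_col) (1, 1) 1 code
      (((target_row + target_col) * (target_row + target_col)).toNat + target_col.toNat)

-- ===== PORT B =====
def get_code_alt (target_row : Int) (target_col : Int) : Int :=
  let s : Int := target_row + target_col
  let n : Int := PySem.Int.floordiv ((s - 2) * (s - 1)) 2 + target_col
  20151125 * PySem.Int.powMod 252533 (n - 1).toNat 33554393 % 33554393

-- ===== PRECONDITION & SPEC =====
-- A's diagonal walk only ever visits coordinates with row ≥ 1 and col ≥ 1, so on any other
-- target A loops forever (never returns); Pre_ is exactly the set of inputs A returns on.
def Pre_get_code (target_row : Int) (target_col : Int) : Prop := 1 ≤ target_row ∧ 1 ≤ target_col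
instance (target_row : Int) (target_col : Int) : Decidable (Pre_get_code target_row target_col) := by unfold Pre_get_code; infer_instance

def pvWitness_get_code : Int × Int := (3, 4)

def Spec_get_code (target_row : Int) (target_col : Int) (out : Int) : Prop := out = get_code_alt target_row target_col
instance (target_row : Int) (target_col : Int) (out : Int) : Decidable (Spec_get_code target_row target_col out) := by unfold Spec_get_code; infer_instance

-- ===== CLAIM (what is proved, stated in full; the proofs are below) =====
def Claim_equal_get_code : Prop := ∀ (target_row : Int) (target_col : Int), Dom_get_code target_row target_col → Pre_get_code target_row target_col → Spec_get_code target_row target_col (get_code target_row target_col)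

-- ===== LEMMAS AND PROOFS =====

-- the 1-based position of (r, c) in the diagonal enumeration
def idx (r c : Int) : Int := (r + c - 2) * (r + c - 1) / 2 + c

lemma two_mul_idx (r c : Int) : 2 * idx r c = (r + c - 2) * (r + c - 1) + 2 * c := by
  have h : (2 : Int) ∣ (r + c - 2) * (r + c - 1) := by
    rcases Int.even_mul_succ_self (r + c - 2) with ⟨k, hk⟩
    exact ⟨k, by linarith [hk]⟩
  unfold idx
  rw [mul_add, Int.mul_ediv_cancel' h]

lemma idx_inj {a b r c : Int} (ha : 1 ≤ a) (hb : 1 ≤ b) (hr : 1 ≤ r) (hc : 1 ≤ c)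
    (h : idx a b = idx r c) : a = r ∧ b = c := by
  have h2 : (a + b - 2) * (a + b - 1) + 2 * b = (r + c - 2) * (r + c - 1) + 2 * c := by
    have := two_mul_idx a b; have := two_mul_idx r c; linarith [h]
  have hst : a + b = r + c := by
    rcases lt_trichotomy (a + b) (r + c) with hlt | heq | hgt
    · exfalso
      have hmono : (a + b - 1) * (a + b) ≤ (r + c - 2) * (r + c - 1) := by
        have h1 : a + b - 1 ≤ r + c - 2 := by omega
        have h2 : a + b ≤ r + c - 1 := by omega
        have h3 : (0 : Int) ≤ a + b - 1 := by omega
        have h4 : (0 : Int) ≤ a + b := by omega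
        exact mul_le_mul h1 h2 h4 (by omega)
      nlinarith [h2, hmono]
    · exact heq
    · exfalso
      have hmono : (r + c - 1) * (r + c) ≤ (a + b - 2) * (a + b - 1) := by
        have h1 : r + c - 1 ≤ a + b - 2 := by omega
        have h2 : r + c ≤ a + b - 1 := by omega
        exact mul_le_mul h1 h2 (by omega) (by omega)
      nlinarith [h2, hmono]
  have : b = c := by
    have : (a + b - 2) * (a + b - 1) = (r + c - 2) * (r + c - 1) := by rw [hst]
    omega
  omega

lemma idx_ge_one {r c : Int} (hr : 1 ≤ r) (hc : 1 ≤ c) : 1 ≤ idx r c := by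
  have h := two_mul_idx r c
  have : (0 : Int) ≤ (r + c - 2) * (r + c - 1) := by
    apply mul_nonneg <;> omega
  omega

lemma idx_one_one : idx 1 1 = 1 := by decide

lemma emod_mul_step (c x y M : Int) : (c * x % M) * y % M = c * x * y % M := by
  conv_rhs => rw [Int.mul_emod (c * x) y, ← Int.emod_emod_of_dvd (c * x) (dvd_refl M), ← Int.mul_emod]

-- invariant step: each loop iteration moves to the next coordinate in diagonal order
lemma loopA_eq (fuel : Nat) : ∀ (a b row code tr tc : Int),
    1 ≤ a → 1 ≤ b → a + b = row + 1 → 1 ≤ tr → 1 ≤ tc →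
    idx a b < idx tr tc → idx tr tc - idx a b ≤ (fuel : Int) →
    loopA (tr, tc) (a, b) row code fuel
      = (code * 252533 ^ (idx tr tc - idx a b).toNat) % 33554393 := by
  induction fuel with
  | zero =>
    intro a b row code tr tc _ _ _ _ _ hlt hle
    exfalso; omega
  | succ fuel ih =>
    intro a b row code tr tc ha hb hrow htr htc hlt hle
    show (if ((if a - 1 = 0 then ((row + 1, 1) : Int × Int) else (a - 1, b + 1))) = (tr, tc)
            then (code * 252533) % 33554393
            else loopA (tr, tc)
                   (if a - 1 = 0 then ((row + 1, 1) : Int × Int) else (a - 1, b + 1))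
                   (if a - 1 = 0 then row + 1 else row)
                   ((code * 252533) % 33554393) fuel)
          = (code * 252533 ^ (idx tr tc - idx a b).toNat) % 33554393
    by_cases h1 : a - 1 = 0
    · -- wrap to the next diagonal: coord becomes (row+1, 1)
      simp only [if_pos h1]
      have hstep : idx (row + 1) 1 = idx a b + 1 := by
        have e1 := two_mul_idx (row + 1) 1
        have e2 := two_mul_idx a b
        have ha1 : a = 1 := by omega
        have hbr : b = row := by omega
        subst ha1; subst hbr
        nlinarith [e1, e2]
      by_cases heq : ((row + 1, 1) : Int × Int) = (tr, tc)
      · simp only [if_pos heq]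
        obtain ⟨e1, e2⟩ : row + 1 = tr ∧ 1 = tc := by simpa using heq
        subst e1; subst e2
        have h2 : (idx (row + 1) 1 - idx a b).toNat = 1 := by omega
        rw [h2, pow_one]
      · simp only [if_neg heq]
        have hlt' : idx (row + 1) 1 < idx tr tc := by
          rcases lt_or_eq_of_le (by omega : idx a b + 1 ≤ idx tr tc) with h | h
          · omega
          · exfalso
            have : idx (row + 1) 1 = idx tr tc := by omega
            rcases idx_inj (by omega) (by omega) htr htc this with ⟨e1, e2⟩
            exact heq (by rw [e1, e2])
        rw [ih (row + 1) 1 (row + 1) ((code * 252533) % 33554393) tr tc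
          (by omega) (by omega) (by omega) htr htc hlt' (by push_cast at hle ⊢; omega)]
        rw [hstep]
        have hk : (idx tr tc - (idx a b + 1)).toNat + 1 = (idx tr tc - idx a b).toNat := by omega
        rw [← hk, pow_succ, emod_mul_step]
        congr 1
        ring
    · -- move along the diagonal: coord becomes (a-1, b+1)
      simp only [if_neg h1]
      have hstep : idx (a - 1) (b + 1) = idx a b + 1 := by
        have e1 := two_mul_idx (a - 1) (b + 1)
        have e2 := two_mul_idx a b
        nlinarith [e1, e2]
      by_cases heq : ((a - 1, b + 1) : Int × Int) = (tr, tc)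
      · simp only [if_pos heq]
        obtain ⟨e1, e2⟩ : a - 1 = tr ∧ b + 1 = tc := by simpa using heq
        subst e1; subst e2
        have h2 : (idx (a - 1) (b + 1) - idx a b).toNat = 1 := by omega
        rw [h2, pow_one]
      · simp only [if_neg heq]
        have hlt' : idx (a - 1) (b + 1) < idx tr tc := by
          rcases lt_or_eq_of_le (by omega : idx a b + 1 ≤ idx tr tc) with h | h
          · omega
          · exfalso
            have : idx (a - 1) (b + 1) = idx tr tc := by omega
            rcases idx_inj (by omega) (by omega) htr htc this with ⟨e1, e2⟩
            exact heq (by rw [e1, e2])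
        rw [ih (a - 1) (b + 1) row ((code * 252533) % 33554393) tr tc
          (by omega) (by omega) (by omega) htr htc hlt' (by push_cast at hle ⊢; omega)]
        rw [hstep]
        have hk : (idx tr tc - (idx a b + 1)).toNat + 1 = (idx tr tc - idx a b).toNat := by omega
        rw [← hk, pow_succ, emod_mul_step]
        congr 1
        ring

-- ===== VERDICT (by name: the statement is the Claim_ definition above) =====
theorem get_code_spec : Claim_equal_get_code := by
  unfold Claim_equal_get_code
  intro r c _ hpre
  obtain ⟨hr, hc⟩ := hpre
  unfold Spec_get_code get_code get_code_alt
  show (if ((1, 1) : Int × Int) = (r, c) then (20151125 : Int)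
          else loopA (r, c) (1, 1) 1 20151125 (((r + c) * (r + c)).toNat + c.toNat))
        = 20151125 * PySem.Int.powMod 252533
            ((PySem.Int.floordiv ((r + c - 2) * (r + c - 1)) 2 + c) - 1).toNat 33554393 % 33554393
  have hn : PySem.Int.floordiv ((r + c - 2) * (r + c - 1)) 2 + c = idx r c := by
    rw [PySem.Int.floordiv_eq_ediv_of_pos (by omega)]; rfl
  rw [hn, PySem.Int.powMod_eq_emod _ _ (by omega : (0:Int) < 33554393)]
  by_cases h11 : ((1, 1) : Int × Int) = (r, c)
  · rw [if_pos h11]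
    obtain ⟨e1, e2⟩ : (1 : Int) = r ∧ (1 : Int) = c := by simpa using h11
    subst e1; subst e2
    decide
  · rw [if_neg h11]
    have hgt : idx 1 1 < idx r c := by
      have h1 := idx_ge_one hr hc
      rcases lt_or_eq_of_le (idx_one_one ▸ h1 : idx 1 1 ≤ idx r c) with h | h
      · exact h
      · exfalso
        rcases idx_inj (by norm_num) (by norm_num) hr hc h with ⟨e1, e2⟩
        exact h11 (by rw [← e1, ← e2])
    have hfuel : idx r c - idx 1 1 ≤ (((((r + c) * (r + c)).toNat) + c.toNat : Nat) : Int) := by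
      have e := two_mul_idx r c
      have h1 : ((((r + c) * (r + c)).toNat : Nat) : Int) = (r + c) * (r + c) :=
        Int.toNat_of_nonneg (mul_self_nonneg _)
      have h2 : ((c.toNat : Nat) : Int) = c := Int.toNat_of_nonneg (by omega)
      push_cast
      rw [h1, h2]
      nlinarith [e, idx_one_one]
    rw [loopA_eq (((r + c) * (r + c)).toNat + c.toNat) 1 1 1 20151125 r c
      (by norm_num) (by norm_num) (by norm_num) hr hc hgt hfuel, idx_one_one]
    conv_lhs => rw [Int.mul_emod]
    conv_rhs => rw [Int.mul_emod]
    norm_num
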